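-- pv_equiv track=rewrite | github.com/kazamazza/pokerai | tools/rangenet/derive_pair_to_seq.py | is_srp_open_call
-- ===== SOURCE A (Python) =====
-- def is_srp_open_call(seq, ip_pos: str, oop_pos: str) -> bool:
--     """
--     Single-raised pot we want: ip_pos opens/raises, and the first action by oop_pos is CALL,
--     with no intervening re-raise before oop acts.
--     """
--     if not seq:
--         return False
--
--     # opener must be ip_pos and first action must be OPEN/RAISE
--     if not (seq[0].get("pos") == ip_pos and seq[0].get("action") in ("OPEN", "RAISE")):
--         return False
--
--     # ensure oop's first action is CALL and no re-raise occurs before that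
--     re_raised = False
--     for step in seq[1:]:
--         pos = step.get("pos")
--         act = step.get("action")
--         if act in ("RAISE", "ALL_IN", "3BET", "4BET", "5BET"):
--             re_raised = True
--         if pos == oop_pos:
--             return (act == "CALL") and (not re_raised)
--     return False
-- ===== SOURCE B (Python) =====
-- _BLOCKERS = ("RAISE", "ALL_IN", "3BET", "4BET", "5BET")
--
-- def is_srp_open_call(seq, ip_pos: str, oop_pos: str) -> bool:
--     if not seq:
--         return False
--     if not (seq[0].get("pos") == ip_pos and seq[0].get("action") in ("OPEN", "RAISE")):
--         return False
--     # declarative witness search: some post-open step is oop's CALL whose entire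
--     # preceding post-open prefix contains neither an oop action nor a re-raise
--     tail = seq[1:]
--     return any(
--         step.get("pos") == oop_pos
--         and step.get("action") == "CALL"
--         and all(p.get("pos") != oop_pos and p.get("action") not in _BLOCKERS
--                 for p in tail[:i])
--         for i, step in enumerate(tail)
--     )
-- ===== Notes on version B (the rewrite author's own statement) =====
-- stated objective: alternative
-- what changed: Replaces A's single stateful scan carrying a re_raised flag with a declarative witness search: any() over enumerate(seq[1:]) looking for an oop CALL step whose whole preceding slice contains neither an oop action nor a re-raise (a quantifier formulation instead of a flagged early-return loop).
import Mathlib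
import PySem

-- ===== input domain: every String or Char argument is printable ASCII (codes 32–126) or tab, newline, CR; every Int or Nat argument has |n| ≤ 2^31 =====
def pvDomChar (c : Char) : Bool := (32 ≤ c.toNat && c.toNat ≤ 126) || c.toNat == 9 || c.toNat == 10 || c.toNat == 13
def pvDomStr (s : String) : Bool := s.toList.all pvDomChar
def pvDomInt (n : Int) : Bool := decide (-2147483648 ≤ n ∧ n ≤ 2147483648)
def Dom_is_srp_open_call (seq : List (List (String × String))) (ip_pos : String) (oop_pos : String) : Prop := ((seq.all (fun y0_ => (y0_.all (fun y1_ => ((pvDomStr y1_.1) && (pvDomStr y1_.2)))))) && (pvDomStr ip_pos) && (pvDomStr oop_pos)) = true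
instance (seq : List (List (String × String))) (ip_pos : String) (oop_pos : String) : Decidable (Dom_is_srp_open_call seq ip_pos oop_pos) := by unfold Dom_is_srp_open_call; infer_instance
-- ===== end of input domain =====

-- B replaces A's stateful early-return scan (re_raised flag) with a declarative witness
-- search (any over enumerate with a per-candidate prefix check); equivalence proved.
-- ===== PORT A =====
-- shared dict lookup (step.get(k)) and re-raise membership test, used by both ports
def pvGet (step : List (String × String)) (k : String) : Option String :=
  (PySem.Dict.mk step).get? k

def pvIsReRaise (act : Option String) : Bool :=
  act = some "RAISE" || act = some "ALL_IN" || act = some "3BET" || act = some "4BET" || act = some "5BET"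

def pvA_loop (oop_pos : String) : List (List (String × String)) → Bool → Bool
  | [], _ => false
  | step :: rest, re_raised =>
    let pos := pvGet step "pos"
    let act := pvGet step "action"
    let re' := re_raised || pvIsReRaise act
    if pos = some oop_pos then (act = some "CALL") && !re'
    else pvA_loop oop_pos rest re'

def is_srp_open_call (seq : List (List (String × String))) (ip_pos : String) (oop_pos : String) : Bool :=
  match seq with
  | [] => false
  | first :: _ =>
    if !(pvGet first "pos" = some ip_pos
         && (pvGet first "action" = some "OPEN" || pvGet first "action" = some "RAISE")) then
      false
    else
      pvA_loop oop_pos (PySem.List.slice seq (some 1) none) false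

-- ===== PORT B =====
-- p's step is "clean" before oop acts: not an oop action and not a blocker (re-raise)
def pvClean (oop_pos : String) (p : List (String × String)) : Bool :=
  !(pvGet p "pos" = some oop_pos) && !(pvIsReRaise (pvGet p "action"))

def is_srp_open_call_alt (seq : List (List (String × String))) (ip_pos : String) (oop_pos : String) : Bool :=
  match seq with
  | [] => false
  | first :: _ =>
    if !(pvGet first "pos" = some ip_pos
         && (pvGet first "action" = some "OPEN" || pvGet first "action" = some "RAISE")) then
      false
    else
      let tail := PySem.List.slice seq (some 1) none
      (PySem.List.enumerate tail).any (fun is =>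
        pvGet is.2 "pos" = some oop_pos
        && pvGet is.2 "action" = some "CALL"
        && (PySem.List.slice tail none (some is.1)).all (pvClean oop_pos))

-- ===== PRECONDITION & SPEC =====
def Spec_is_srp_open_call (seq : List (List (String × String))) (ip_pos : String) (oop_pos : String) (out : Bool) : Prop := out = is_srp_open_call_alt seq ip_pos oop_pos
instance (seq : List (List (String × String))) (ip_pos : String) (oop_pos : String) (out : Bool) : Decidable (Spec_is_srp_open_call seq ip_pos oop_pos out) := by unfold Spec_is_srp_open_call; infer_instance

-- ===== CLAIM (what is proved, stated in full; the proofs are below) =====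
def Claim_equal_is_srp_open_call : Prop := ∀ (seq : List (List (String × String))) (ip_pos : String) (oop_pos : String), Dom_is_srp_open_call seq ip_pos oop_pos → Spec_is_srp_open_call seq ip_pos oop_pos (is_srp_open_call seq ip_pos oop_pos)

-- ===== LEMMAS AND PROOFS =====

-- B's any-over-enumerate body, abstracted (proof helper)
def pvWit (oop_pos : String) (tail : List (List (String × String))) : Bool :=
  (PySem.List.enumerate tail).any (fun is =>
    pvGet is.2 "pos" = some oop_pos
    && pvGet is.2 "action" = some "CALL"
    && (PySem.List.slice tail none (some is.1)).all (pvClean oop_pos))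

-- recursive characterisation of B's witness search, used only in the proofs
def pvF (oop_pos : String) : List (List (String × String)) → Bool
  | [] => false
  | s :: rest =>
    (pvGet s "pos" = some oop_pos && pvGet s "action" = some "CALL")
      || (pvClean oop_pos s && pvF oop_pos rest)

-- B's any-over-enumerate, generalised over an already-traversed prefix
theorem pvWit_gen (oop_pos : String) (rest : List (List (String × String))) :
    ∀ (pre : List (List (String × String))),
    ((PySem.List.enumerate rest (pre.length : Int)).any (fun is =>
        pvGet is.2 "pos" = some oop_pos
        && pvGet is.2 "action" = some "CALL"
        && (PySem.List.slice (pre ++ rest) none (some is.1)).all (pvClean oop_pos)))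
      = (pre.all (pvClean oop_pos) && pvF oop_pos rest) := by
  induction rest with
  | nil => intro pre; simp [PySem.List.enumerate_nil, pvF]
  | cons s rest ih =>
    intro pre
    rw [PySem.List.enumerate_cons]
    have h1 : ((pre.length : Int) + 1) = (((pre ++ [s]).length : Nat) : Int) := by
      simp
    have h2 : pre ++ s :: rest = (pre ++ [s]) ++ rest := by simp
    simp only [List.any_cons, h1, h2, ih (pre ++ [s])]
    rw [PySem.List.slice_to_natCast]
    have h3 : ((pre ++ [s]) ++ rest).take pre.length = pre := by
      rw [List.append_assoc, List.take_append_of_le_length (by simp)]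
      simp
    rw [h3]
    simp only [List.all_append, List.all_cons, List.all_nil, pvClean]
    cases hp : decide (pvGet s "pos" = some oop_pos) <;>
      cases hc : decide (pvGet s "action" = some "CALL") <;>
      cases hr : pvIsReRaise (pvGet s "action") <;>
      cases hall : pre.all (fun p => !decide (pvGet p "pos" = some oop_pos)
          && !pvIsReRaise (pvGet p "action")) <;>
      simp_all [pvF, pvClean]

theorem pvWit_eq_pvF (oop_pos : String) (tail : List (List (String × String))) :
    pvWit oop_pos tail = pvF oop_pos tail := by
  have := pvWit_gen oop_pos tail []
  simpa [pvWit] using this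

-- A's flagged scan equals the recursive characterisation (for any initial flag value)
theorem pvA_loop_eq (oop_pos : String) (tail : List (List (String × String))) (re : Bool) :
    pvA_loop oop_pos tail re = (!re && pvF oop_pos tail) := by
  induction tail generalizing re with
  | nil => simp [pvA_loop, pvF]
  | cons s rest ih =>
    by_cases hp : pvGet s "pos" = some oop_pos
    · by_cases hc : pvGet s "action" = some "CALL"
      · have hr : pvIsReRaise (pvGet s "action") = false := by
          simp [pvIsReRaise, hc]
        simp [pvA_loop, pvF, hp, hc, pvClean, pvIsReRaise]
      · simp [pvA_loop, pvF, hp, hc, pvClean]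
    · simp only [pvA_loop, pvF, hp, ih]
      cases re <;> cases hr : pvIsReRaise (pvGet s "action") <;>
        simp_all [pvClean]

-- ===== VERDICT (by name: the statement is the Claim_ definition above) =====
theorem is_srp_open_call_spec : Claim_equal_is_srp_open_call := by
  intro seq ip_pos oop_pos _
  unfold Spec_is_srp_open_call
  cases seq with
  | nil => rfl
  | cons first rest =>
    simp only [is_srp_open_call, is_srp_open_call_alt]
    split
    · rfl
    · rw [pvA_loop_eq]
      have : pvWit oop_pos (PySem.List.slice (first :: rest) (some 1) none)
          = pvF oop_pos (PySem.List.slice (first :: rest) (some 1) none) :=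
        pvWit_eq_pvF _ _
      simp only [pvWit] at this
      simp [this]
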